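-- pv_equiv track=rewrite | github.com/jamesdu0504/masters-project | tests/test.py | smallest_run_times
-- ===== SOURCE A (Python) =====
-- def smallest_run_times(tuple_list, function_index_list_1, function_index_list_2):
--
--     # Create a list of the smallest values of each tuple of each function
--     smallest_values_list_1 = []
--     smallest_values_list_2 = []
--     for i in function_index_list_1:
--         smallest_values_list_1.append((min([x for x in tuple_list[i] if x != 0])))
--     for i in function_index_list_2:
--         smallest_values_list_2.append((min([x for x in tuple_list[i] if x != 0])))
--
--
--
--     '''
--     # Find and store all the indices of each occurence of the smallest value of each tuple in tuple list
--
--     smallest_value_index_list_1 = []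
--     smallest_value_index_list_2 = []
--     for index,value in enumerate(function_index_list_1):
--         smallest_value_index_list_1.append([i for i,j in enumerate(tuple_list[value]) if j == smallest_values_list_1[index]])
--     for index,value in enumerate(function_index_list_2):
--         smallest_value_index_list_2.append([i for i,j in enumerate(tuple_list[value]) if j == smallest_values_list_2[index]])
--
--     print (smallest_value_index_list_1)
--     print (smallest_value_index_list_2)
--     '''
--
--
--     # Find and store all the indices of each occurence of the smallest timing value of each function
--     val1 = min(smallest_values_list_1)
--     val2 = min(smallest_values_list_2)
--
--     function1_tuple_index = []
--     function2_tuple_index = []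
--
--     list1 = []
--     list2 = []
--     for index,value in enumerate(smallest_values_list_1):
--         if (value == val1):
--             function1_tuple_index.append(function_index_list_1[index])
--             temp = function_index_list_1[index]
--             list1.append([i for i,j in enumerate(tuple_list[temp]) if j == val1])
--
--     for index,value in enumerate(smallest_values_list_2):
--         if (value == val2):
--             function2_tuple_index.append(function_index_list_2[index])
--             temp = function_index_list_2[index]
--             list2.append([i for i,j in enumerate(tuple_list[temp]) if j == val2])
--     '''
--     print (smallest_values_list_1)
--     print (smallest_values_list_2)
--     print ()
--     print (list1)
--     print (list2)
--     print ()
--     print (function1_tuple_index)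
--     print (function2_tuple_index)
--     '''
--     return list1, list2, function1_tuple_index, function2_tuple_index
-- ===== SOURCE B (Python) =====
-- def smallest_run_times(tuple_list, function_index_list_1, function_index_list_2):
--     # One pass per group: running best value with reset-on-smaller, instead of
--     # materialising the list of per-function minima and re-scanning it.
--     def pick(group):
--         best = None
--         winners = []
--         for i in group:
--             m = min(x for x in tuple_list[i] if x != 0)
--             if best is None or m < best:
--                 best = m
--                 winners = [i]
--             elif m == best:
--                 winners.append(i)
--         lists = [[p for p, x in enumerate(tuple_list[i]) if x == best] for i in winners]
--         return lists, winners
--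
--     list1, function1_tuple_index = pick(function_index_list_1)
--     list2, function2_tuple_index = pick(function_index_list_2)
--     return list1, list2, function1_tuple_index, function2_tuple_index
-- ===== Notes on version B (the rewrite author's own statement) =====
-- stated objective: alternative
-- what changed: B replaces A's two-phase scheme (materialise the full list of per-function minima, take its min, then re-scan that list with enumerate+indexing back into the group list) by a single running-best pass per group that keeps the current best value and its winner indices, resetting on a strictly smaller value, and only then computes position lists for the winners.
import Mathlib
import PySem

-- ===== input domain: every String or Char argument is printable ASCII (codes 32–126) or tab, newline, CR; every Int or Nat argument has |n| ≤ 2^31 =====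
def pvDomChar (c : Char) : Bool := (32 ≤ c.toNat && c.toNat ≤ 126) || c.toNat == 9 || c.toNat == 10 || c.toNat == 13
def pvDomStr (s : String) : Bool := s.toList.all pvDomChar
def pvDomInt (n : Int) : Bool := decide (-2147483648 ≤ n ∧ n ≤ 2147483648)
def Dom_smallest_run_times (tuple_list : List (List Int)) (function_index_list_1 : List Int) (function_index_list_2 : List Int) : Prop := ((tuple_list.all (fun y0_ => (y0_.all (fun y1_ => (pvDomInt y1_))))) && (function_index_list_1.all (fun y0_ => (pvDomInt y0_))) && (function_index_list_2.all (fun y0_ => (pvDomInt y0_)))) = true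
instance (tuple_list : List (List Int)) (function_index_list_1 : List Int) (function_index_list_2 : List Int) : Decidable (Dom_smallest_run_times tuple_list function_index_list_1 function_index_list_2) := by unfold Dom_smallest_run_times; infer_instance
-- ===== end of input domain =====

-- B: one running-best pass per group with reset-on-smaller (alternative decomposition;
-- same asymptotic cost); proved to return exactly A's value on Pre_.


-- ===== PORT A =====
-- min([x for x in tuple_list[i] if x != 0])  (0 when the index is bad / no nonzero: those inputs are outside Pre_)
def pvMinNZ (tuple_list : List (List Int)) (i : Int) : Int :=
  (PySem.List.min? (((PySem.List.pyGet? tuple_list i).getD []).filter (fun x => x != 0)) (fun y => y)).getD 0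

-- [i for i,j in enumerate(t) if j == v]
def pvOccs (t : List Int) (v : Int) : List Int :=
  ((PySem.List.enumerate t 0).filter (fun p => p.2 == v)).map (fun p => p.1)

-- body of A's 'for index,value in enumerate(smallest_values_list): if value == val: …'
def pvStepA (group : List (List Int)) (fil : List Int) (val : Int)
    (st : List Int × List (List Int)) (p : Int × Int) : List Int × List (List Int) :=
  if p.2 = val then
    let temp := (PySem.List.pyGet? fil p.1).getD 0
    (st.1 ++ [temp], st.2 ++ [pvOccs ((PySem.List.pyGet? group temp).getD []) val])
  else st

def smallest_run_times (tuple_list : List (List Int)) (function_index_list_1 : List Int) (function_index_list_2 : List Int) : List (List Int) × List (List Int) × List Int × List Int :=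
  let sv1 := function_index_list_1.foldl (fun acc i => acc ++ [pvMinNZ tuple_list i]) []
  let sv2 := function_index_list_2.foldl (fun acc i => acc ++ [pvMinNZ tuple_list i]) []
  let val1 := (PySem.List.min? sv1 (fun y => y)).getD 0
  let val2 := (PySem.List.min? sv2 (fun y => y)).getD 0
  let st1 := (PySem.List.enumerate sv1 0).foldl (pvStepA tuple_list function_index_list_1 val1) ([], [])
  let st2 := (PySem.List.enumerate sv2 0).foldl (pvStepA tuple_list function_index_list_2 val2) ([], [])
  (st1.2, st2.2, st1.1, st2.1)

-- ===== PORT B =====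
-- body of B's running-best loop (best = none before the first element)
def pvStepB (tuple_list : List (List Int)) (st : Option Int × List Int) (i : Int) : Option Int × List Int :=
  let m := pvMinNZ tuple_list i
  match st.1 with
  | none => (some m, [i])
  | some b => if m < b then (some m, [i]) else if m = b then (some b, st.2 ++ [i]) else st

def pvPick (tuple_list : List (List Int)) (group : List Int) : List (List Int) × List Int :=
  let st := group.foldl (pvStepB tuple_list) (none, [])
  (st.2.map (fun i => pvOccs ((PySem.List.pyGet? tuple_list i).getD []) (st.1.getD 0)), st.2)

def smallest_run_times_alt (tuple_list : List (List Int)) (function_index_list_1 : List Int) (function_index_list_2 : List Int) : List (List Int) × List (List Int) × List Int × List Int :=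
  let r1 := pvPick tuple_list function_index_list_1
  let r2 := pvPick tuple_list function_index_list_2
  (r1.1, r2.1, r1.2, r2.2)

-- ===== PRECONDITION & SPEC =====
-- Pre_ excludes exactly the inputs where Python A raises: an empty function index list
-- (min() of an empty list), an index outside tuple_list's Python range (IndexError), or a
-- referenced tuple with no nonzero entry (min() of an empty comprehension).
def Pre_smallest_run_times (tuple_list : List (List Int)) (function_index_list_1 : List Int) (function_index_list_2 : List Int) : Prop :=
  function_index_list_1 ≠ [] ∧ function_index_list_2 ≠ [] ∧
  ∀ i ∈ function_index_list_1 ++ function_index_list_2,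
    PySem.Raise.InRange tuple_list.length i ∧
    ((PySem.List.pyGet? tuple_list i).getD []).any (fun x => x != 0)
instance (tuple_list : List (List Int)) (function_index_list_1 : List Int) (function_index_list_2 : List Int) : Decidable (Pre_smallest_run_times tuple_list function_index_list_1 function_index_list_2) := by unfold Pre_smallest_run_times; infer_instance

def pvWitness_smallest_run_times : List (List Int) × List Int × List Int :=
  ([[3, 0, 1, 1], [2, 5]], [0, 1], [1, 0, 0])

def Spec_smallest_run_times (tuple_list : List (List Int)) (function_index_list_1 : List Int) (function_index_list_2 : List Int) (out : List (List Int) × List (List Int) × List Int × List Int) : Prop := out = smallest_run_times_alt tuple_list function_index_list_1 function_index_list_2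
instance (tuple_list : List (List Int)) (function_index_list_1 : List Int) (function_index_list_2 : List Int) (out : List (List Int) × List (List Int) × List Int × List Int) : Decidable (Spec_smallest_run_times tuple_list function_index_list_1 function_index_list_2 out) := by unfold Spec_smallest_run_times; infer_instance

-- ===== CLAIM (what is proved, stated in full; the proofs are below) =====
def Claim_equal_smallest_run_times : Prop := ∀ (tuple_list : List (List Int)) (function_index_list_1 : List Int) (function_index_list_2 : List Int), Dom_smallest_run_times tuple_list function_index_list_1 function_index_list_2 → Pre_smallest_run_times tuple_list function_index_list_1 function_index_list_2 → Spec_smallest_run_times tuple_list function_index_list_1 function_index_list_2 (smallest_run_times tuple_list function_index_list_1 function_index_list_2)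

-- ===== LEMMAS AND PROOFS =====

theorem pv_foldl_min_le {l : List Int} : ∀ b : Int, l.foldl min b ≤ b := by
  induction l with
  | nil => intro b; simp
  | cons x t ih => intro b; exact le_trans (ih (min b x)) (min_le_left _ _)

-- B's running-best loop from a live state (some b, acc): the final best is the running
-- minimum, and the winners are acc (kept iff b stays minimal) plus the filtered tail.
theorem pv_foldB (tl : List (List Int)) (g : List Int) : ∀ (b : Int) (acc : List Int),
    g.foldl (pvStepB tl) (some b, acc) =
      (some ((g.map (pvMinNZ tl)).foldl min b),
       (if (g.map (pvMinNZ tl)).foldl min b = b then acc else []) ++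
         g.filter (fun i => pvMinNZ tl i == (g.map (pvMinNZ tl)).foldl min b)) := by
  induction g with
  | nil => intro b acc; simp
  | cons j t ih =>
    intro b acc
    have hle : ∀ c : Int, (t.map (pvMinNZ tl)).foldl min c ≤ c := fun c => pv_foldl_min_le c
    simp only [List.foldl_cons, List.map_cons, List.filter_cons]
    rcases lt_trichotomy (pvMinNZ tl j) b with h | h | h
    · rw [show pvStepB tl (some b, acc) j = (some (pvMinNZ tl j), [j]) from by
        simp [pvStepB, h], ih]
      simp only [min_eq_right h.le]
      have hMne : (t.map (pvMinNZ tl)).foldl min (pvMinNZ tl j) ≠ b := by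
        have := hle (pvMinNZ tl j); omega
      by_cases hM : (t.map (pvMinNZ tl)).foldl min (pvMinNZ tl j) = pvMinNZ tl j
      · simp [hM, ne_of_lt h]
      · have hM' : ¬ pvMinNZ tl j = (t.map (pvMinNZ tl)).foldl min (pvMinNZ tl j) :=
          fun he => hM he.symm
        simp [hM, hMne, hM']
    · rw [show pvStepB tl (some b, acc) j = (some b, acc ++ [j]) from by
        simp [pvStepB, h], ih]
      simp only [h, min_self]
      by_cases hM : (t.map (pvMinNZ tl)).foldl min b = b
      · simp [hM]
      · have hM' : ¬ b = (t.map (pvMinNZ tl)).foldl min b := fun he => hM he.symm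
        simp [hM, hM']
    · rw [show pvStepB tl (some b, acc) j = (some b, acc) from by
        simp [pvStepB, not_lt_of_gt h, ne_of_gt h], ih]
      simp only [min_eq_left h.le]
      have hM' : ¬ pvMinNZ tl j = (t.map (pvMinNZ tl)).foldl min b := by
        have := hle b; omega
      simp [hM']

-- A's enumerate-and-index-back loop over the minima of 'rest', sitting after the prefix
-- 'pre' of the full group list, collects exactly the filtered winners with their lists.
theorem pv_foldA (tl : List (List Int)) (val : Int) :
    ∀ (rest pre : List Int) (acc : List Int × List (List Int)),
    (PySem.List.enumerate (rest.map (pvMinNZ tl)) (pre.length : Int)).foldl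
        (pvStepA tl (pre ++ rest) val) acc =
      (acc.1 ++ rest.filter (fun i => pvMinNZ tl i == val),
       acc.2 ++ (rest.filter (fun i => pvMinNZ tl i == val)).map
         (fun i => pvOccs ((PySem.List.pyGet? tl i).getD []) val)) := by
  intro rest
  induction rest with
  | nil => intro pre acc; simp [PySem.List.enumerate_nil]
  | cons j t ih =>
    intro pre acc
    simp only [List.map_cons, PySem.List.enumerate_cons, List.foldl_cons, List.filter_cons]
    have hget : PySem.List.pyGet? (pre ++ j :: t) (pre.length : Int) = some j :=
      PySem.List.pyGet?_append_length pre t j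
    have hcast : ((pre.length : Int) + 1) = (((pre ++ [j]).length : Int)) := by
      simp
    have hres : pre ++ j :: t = (pre ++ [j]) ++ t := by simp
    by_cases h : pvMinNZ tl j = val
    · rw [show pvStepA tl (pre ++ j :: t) val acc ((pre.length : Int), pvMinNZ tl j) =
          (acc.1 ++ [j], acc.2 ++ [pvOccs ((PySem.List.pyGet? tl j).getD []) val]) from by
        simp only [pvStepA, h, hget]; rfl]
      rw [hcast, hres, ih]
      simp [h]
    · rw [show pvStepA tl (pre ++ j :: t) val acc ((pre.length : Int), pvMinNZ tl j) = acc from by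
        simp [pvStepA, h]]
      rw [hcast, hres, ih]
      simp [h]

-- Per-group agreement: A's state (winner indices, position lists) matches B's pick, swapped.
theorem pv_group_eq (tl : List (List Int)) (g : List Int) :
    (PySem.List.enumerate (g.foldl (fun acc i => acc ++ [pvMinNZ tl i]) []) 0).foldl
        (pvStepA tl g
          ((PySem.List.min? (g.foldl (fun acc i => acc ++ [pvMinNZ tl i]) []) (fun y => y)).getD 0))
        ([], []) =
      ((pvPick tl g).2, (pvPick tl g).1) := by
  have hsv : g.foldl (fun acc i => acc ++ [pvMinNZ tl i]) [] = g.map (pvMinNZ tl) := by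
    simpa using PySem.List.foldl_append_singleton_eq_map (pvMinNZ tl) g []
  rw [hsv]
  cases g with
  | nil => simp [pvPick, PySem.List.enumerate_nil]
  | cons j t =>
    have hminD : ((PySem.List.min? ((j :: t).map (pvMinNZ tl)) (fun y => y)).getD 0) =
        (t.map (pvMinNZ tl)).foldl min (pvMinNZ tl j) := by
      rw [List.map_cons, PySem.List.min?_id_cons]; rfl
    rw [hminD]
    have hA := pv_foldA tl ((t.map (pvMinNZ tl)).foldl min (pvMinNZ tl j)) (j :: t) [] ([], [])
    simp only [List.nil_append, List.length_nil, Int.natCast_zero] at hA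
    rw [hA]
    have hBst : (j :: t).foldl (pvStepB tl) (none, []) =
        (some ((t.map (pvMinNZ tl)).foldl min (pvMinNZ tl j)),
         (if (t.map (pvMinNZ tl)).foldl min (pvMinNZ tl j) = pvMinNZ tl j then [j] else []) ++
           t.filter (fun i => pvMinNZ tl i == (t.map (pvMinNZ tl)).foldl min (pvMinNZ tl j))) := by
      rw [List.foldl_cons, show pvStepB tl (none, []) j = (some (pvMinNZ tl j), [j]) from by
        simp [pvStepB], pv_foldB]
    simp only [pvPick, hBst]
    generalize (t.map (pvMinNZ tl)).foldl min (pvMinNZ tl j) = M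
    by_cases hM : M = pvMinNZ tl j
    · simp [hM]
    · have hM' : ¬ pvMinNZ tl j = M := fun he => hM he.symm
      simp [hM, hM']

-- ===== VERDICT (by name: the statement is the Claim_ definition above) =====
theorem smallest_run_times_spec : Claim_equal_smallest_run_times := by
  intro tl l1 l2 _ _
  simp only [Spec_smallest_run_times, smallest_run_times, smallest_run_times_alt]
  rw [pv_group_eq tl l1, pv_group_eq tl l2]
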